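-- pv_equiv track=rewrite | github.com/gregoryann/Python-Beginner-Examples | +1500 Python Challenges/Medium/Syncopated Rhythm.py | has_syncopation
-- ===== SOURCE A (Python) =====
-- def has_syncopation(s):
-- 	f= []
-- 	for i in range(len(s)):
-- 		if s[i] == "#":
-- 			f.append(i%2)
-- 	if 1 in f:
-- 		return True
-- 	else:
-- 		return False
-- ===== SOURCE B (Python) =====
-- def has_syncopation(s):
-- 	return "#" in s[1::2]
-- ===== Notes on version B (the rewrite author's own statement) =====
-- stated objective: simpler
-- what changed: Replaces the index loop with i%2 parity bookkeeping and a collected list by a single odd-position slice s[1::2] followed by a substring membership test.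
import Mathlib
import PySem

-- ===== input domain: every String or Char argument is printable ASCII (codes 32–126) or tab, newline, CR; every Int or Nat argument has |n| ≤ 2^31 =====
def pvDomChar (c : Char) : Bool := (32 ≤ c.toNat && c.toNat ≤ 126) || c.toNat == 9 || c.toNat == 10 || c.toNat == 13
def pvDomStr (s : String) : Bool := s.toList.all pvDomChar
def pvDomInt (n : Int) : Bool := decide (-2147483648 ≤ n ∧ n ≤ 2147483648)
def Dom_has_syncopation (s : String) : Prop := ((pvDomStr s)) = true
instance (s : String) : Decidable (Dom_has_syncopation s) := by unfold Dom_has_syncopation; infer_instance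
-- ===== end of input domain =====

-- B replaces A's index loop (collect i%2 for every '#', then test 1 in list) by a
-- membership test on the odd-position slice s[1::2]; objective: simpler.
-- ===== PORT A =====
def has_syncopation (s : String) : Bool :=
  let f : List Int :=
    (PySem.List.pyRange 0 (PySem.Str.len s) 1).foldl
      (fun f i =>
        if PySem.Str.pyGet? s i == some '#' then f ++ [PySem.Int.mod i 2] else f) []
  if (1 : Int) ∈ f then true else false

-- ===== PORT B =====
def has_syncopation_alt (s : String) : Bool :=
  PySem.Str.isIn "#" ((PySem.Str.slice? s (some 1) none 2).getD "")

-- ===== PRECONDITION & SPEC =====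
def Spec_has_syncopation (s : String) (out : Bool) : Prop := out = has_syncopation_alt s
instance (s : String) (out : Bool) : Decidable (Spec_has_syncopation s out) := by unfold Spec_has_syncopation; infer_instance

-- ===== CLAIM (what is proved, stated in full; the proofs are below) =====
def Claim_equal_has_syncopation : Prop := ∀ (s : String), Dom_has_syncopation s → Spec_has_syncopation s (has_syncopation s)

-- ===== LEMMAS AND PROOFS =====

lemma singleton_infix_iff_mem (c : Char) (cs : List Char) : [c] <:+: cs ↔ c ∈ cs := by
  constructor
  · intro h; exact h.subset (List.mem_singleton_self c)
  · intro h
    obtain ⟨t1, t2, rfl⟩ := List.append_of_mem h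
    exact ⟨t1, t2, by simp⟩

lemma memA_iff (s : String) :
    ((1:Int) ∈ ((PySem.List.pyRange 0 (PySem.Str.len s) 1).filter
        (fun i => PySem.Str.pyGet? s i == some '#')).map (fun i => PySem.Int.mod i 2)) ↔
      ∃ k : Nat, s.toList[2*k+1]? = some '#' := by
  simp only [List.mem_map, List.mem_filter, PySem.List.mem_pyRange_one, beq_iff_eq]
  constructor
  · rintro ⟨i, ⟨⟨h0, hlen⟩, hget⟩, hmod⟩
    obtain ⟨j, rfl⟩ := Int.eq_ofNat_of_zero_le h0
    rw [PySem.Int.mod_eq_emod_of_pos (by decide)] at hmod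
    refine ⟨j / 2, ?_⟩
    rw [show 2 * (j / 2) + 1 = j by omega]
    rw [PySem.Str.pyGet?_natCast] at hget
    exact hget
  · rintro ⟨k, hget⟩
    have hlt : 2*k+1 < s.toList.length := (List.getElem?_eq_some_iff.mp hget).1
    have hsl : s.toList.length = s.length := rfl
    refine ⟨((2*k+1 : Nat) : Int), ⟨⟨by omega, by simp only [PySem.Str.len]; omega⟩, ?_⟩, ?_⟩
    · rw [PySem.Str.pyGet?_natCast]; exact hget
    · rw [PySem.Int.mod_eq_emod_of_pos (by decide)]; omega

lemma portA_iff (s : String) :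
    has_syncopation s = true ↔ ∃ k : Nat, s.toList[2*k+1]? = some '#' := by
  unfold has_syncopation
  rw [PySem.List.foldl_append_if]
  simp only [List.nil_append]
  split
  · next hmem => exact iff_of_true rfl ((memA_iff s).mp hmem)
  · next hmem =>
      exact iff_of_false (by simp) (fun hx => hmem ((memA_iff s).mpr hx))

lemma altB_iff (s : String) :
    has_syncopation_alt s = true ↔ ∃ k : Nat, s.toList[2*k+1]? = some '#' := by
  unfold has_syncopation_alt
  simp only [PySem.Str.slice?, PySem.Chars.slice?_eq_listSlice?,
    PySem.List.slice?, PySem.List.sliceIndices]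
  simp only [if_neg (show ¬((2:Int) = 0) by decide), if_neg (show ¬((2:Int) < 0) by decide),
    if_pos (show ((0:Int) < 2) by decide)]
  simp only [Option.map_some, Option.getD_some]
  rw [PySem.Str.isIn_iff_infix]
  simp only [String.toList_ofList]
  rw [show ("#" : String).toList = ['#'] from rfl]
  rw [singleton_infix_iff_mem]
  simp only [List.mem_filterMap, List.mem_range]
  simp only [if_neg (show ¬((1:Int) < 0) by decide)]
  cases Nat.eq_zero_or_pos s.toList.length with
  | inl h0 =>
      refine iff_of_false ?_ ?_
      · rintro ⟨k, hk, -⟩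
        rw [h0, if_neg (by decide)] at hk
        omega
      · rintro ⟨k, hget⟩
        have := (List.getElem?_eq_some_iff.mp hget).1
        omega
  | inr h1 =>
      rw [show (min (1:Int) (↑s.toList.length : Int)) = 1 by omega]
      have hc : (if (1:Int) < (s.toList.length:Int) then
          (((s.toList.length:Int) - 1 + 2 - 1) / 2).toNat else 0) = s.toList.length / 2 := by
        split
        · next h => omega
        · next h => omega
      rw [hc]
      constructor
      · rintro ⟨k, hk, hget⟩
        refine ⟨k, ?_⟩
        rw [show ((1:Int) + 2 * (k:Int)).toNat = 2*k+1 by omega] at hget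
        exact hget
      · rintro ⟨k, hget⟩
        have hlt : 2*k+1 < s.toList.length := (List.getElem?_eq_some_iff.mp hget).1
        refine ⟨k, by omega, ?_⟩
        rw [show ((1:Int) + 2 * (k:Int)).toNat = 2*k+1 by omega]
        exact hget

-- ===== VERDICT =====
theorem has_syncopation_spec : Claim_equal_has_syncopation := by
  intro s _
  unfold Spec_has_syncopation
  by_cases h : ∃ k : Nat, s.toList[2*k+1]? = some '#'
  · rw [(portA_iff s).mpr h, (altB_iff s).mpr h]
  · have h1 : has_syncopation s = false :=
      Bool.not_eq_true _ |>.mp (fun hh => h ((portA_iff s).mp hh))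
    have h2 : has_syncopation_alt s = false :=
      Bool.not_eq_true _ |>.mp (fun hh => h ((altB_iff s).mp hh))
    rw [h1, h2]
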